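-- pv_equiv track=rewrite | github.com/supvolume/codewars_solution | 7kyu/get_a_down_arrow_of.py | get_a_down_arrow_of
-- ===== SOURCE A (Python) =====
-- def get_a_down_arrow_of(n):
--     pyramid = ""
--     for i in range(n,0,-1):
--         num_pattern = ""
--         for j in range(1,i+1):
--             num_pattern += str(j%10)
--         pyramid += " "*(n-i) + num_pattern + num_pattern[-2::-1]+ "\n"
--     return pyramid[:-1]
-- ===== SOURCE B (Python) =====
-- def get_a_down_arrow_of(n):
--     digits = ''.join(str(j % 10) for j in range(1, n + 1))
--     lines = []
--     for i in range(n, 0, -1):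
--         num = digits[:i]
--         lines.append(' ' * (n - i) + num + num[:-1][::-1])
--     return '\n'.join(lines)
-- ===== Notes on version B (the rewrite author's own statement) =====
-- stated objective: simpler
-- what changed: Replaces the nested digit-building loop and the trailing-newline-then-drop trick by a single precomputed digit string sliced to a prefix per row, a mirrored half via slicing, and '\n'.join of a list of lines.
import Mathlib
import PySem

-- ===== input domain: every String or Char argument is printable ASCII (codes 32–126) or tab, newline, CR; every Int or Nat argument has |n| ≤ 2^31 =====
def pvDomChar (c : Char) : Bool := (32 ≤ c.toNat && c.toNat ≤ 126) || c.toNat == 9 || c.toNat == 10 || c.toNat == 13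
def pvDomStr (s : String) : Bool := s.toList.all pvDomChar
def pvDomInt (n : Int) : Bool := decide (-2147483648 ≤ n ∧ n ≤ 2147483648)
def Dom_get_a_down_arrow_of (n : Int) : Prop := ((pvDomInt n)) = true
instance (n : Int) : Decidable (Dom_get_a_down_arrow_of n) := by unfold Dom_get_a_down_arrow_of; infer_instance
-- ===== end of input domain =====

-- B replaces A's nested digit-building loop and trailing-newline-drop trick by one precomputed
-- digit string, prefix slices per row, and '\n'.join — a simpler decomposition, same result.

-- ===== PORT A =====
-- transliteration of A: outer loop accumulates pyramid, inner loop builds num_pattern char by char,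
-- row = spaces + num_pattern + num_pattern[-2::-1] + '\n'; result = pyramid[:-1]
def get_a_down_arrow_of (n : Int) : String :=
  let pyramid : List Char :=
    (PySem.List.pyRange n 0 (-1)).foldl (fun pyr i =>
      let num_pattern : List Char :=
        (PySem.List.pyRange 1 (i + 1) 1).foldl
          (fun s j => s ++ (PySem.Int.toStr (PySem.Int.mod j 10)).toList) []
      pyr ++ PySem.List.pyRepeat [' '] (n - i) ++ num_pattern
          ++ (PySem.List.slice? num_pattern (some (-2)) none (-1)).getD [] ++ ['\n']) []
  String.ofList (PySem.List.slice pyramid none (some (-1)))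

-- ===== PORT B =====
-- transliteration of B: digits table built once, each line is spaces + prefix + mirrored prefix,
-- lines joined with '\n'
def get_a_down_arrow_of_alt (n : Int) : String :=
  let digits : List Char :=
    ((PySem.List.pyRange 1 (n + 1) 1).map
      (fun j => (PySem.Int.toStr (PySem.Int.mod j 10)).toList)).flatten
  let lines : List (List Char) :=
    (PySem.List.pyRange n 0 (-1)).map (fun i =>
      let num := PySem.List.slice digits none (some i)
      PySem.List.pyRepeat [' '] (n - i) ++ num
        ++ (PySem.List.slice num none (some (-1))).reverse)
  String.ofList (PySem.Chars.join ['\n'] lines)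

-- ===== PRECONDITION & SPEC =====
def Spec_get_a_down_arrow_of (n : Int) (out : String) : Prop := out = get_a_down_arrow_of_alt n
instance (n : Int) (out : String) : Decidable (Spec_get_a_down_arrow_of n out) := by unfold Spec_get_a_down_arrow_of; infer_instance

-- ===== CLAIM (what is proved, stated in full; the proofs are below) =====
def Claim_equal_get_a_down_arrow_of : Prop := ∀ (n : Int), Dom_get_a_down_arrow_of n → Spec_get_a_down_arrow_of n (get_a_down_arrow_of n)

-- ===== LEMMAS AND PROOFS =====

-- the digit-string builder both programs share
def pvF (j : Int) : List Char := (PySem.Int.toStr (PySem.Int.mod j 10)).toList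

-- one row of the arrow (without the newline), right-associated
def pvRow (n i : Int) : List Char :=
  PySem.List.pyRepeat [' '] (n - i)
    ++ (((PySem.List.pyRange 1 (i + 1) 1).flatMap pvF)
    ++ ((PySem.List.pyRange 1 (i + 1) 1).flatMap pvF).dropLast.reverse)

theorem filterMap_getElem_range {α : Type} : ∀ (m : Nat) (xs : List α), m ≤ xs.length →
    List.filterMap (fun k => xs[k]?) (List.range m) = xs.take m := by
  intro m
  induction m with
  | zero => simp
  | succ m ih =>
      intro xs h
      rw [List.range_succ, List.filterMap_append, ih xs (by omega)]
      rw [show List.filterMap (fun k => xs[k]?) [m] = [xs[m]] from by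
        simp [List.getElem?_eq_getElem (show m < xs.length by omega)]
        rfl]
      exact List.take_append_getElem h

-- xs[-2::-1] in Python is the reversal of xs without its last element
theorem slice_neg2_none_neg_one_eq {α : Type} (xs : List α) :
    PySem.List.slice? xs (some (-2)) none (-1) = some xs.dropLast.reverse := by
  simp only [PySem.List.slice?, PySem.List.sliceIndices]
  norm_num
  by_cases h : 1 < xs.length
  · rw [if_pos h]
    have hmax : max (-2 + (xs.length:Int)) (-1) = -2 + (xs.length:Int) := by omega
    simp only [hmax]
    have hc : (-2 + (xs.length:Int) + 1).toNat = xs.length - 1 := by omega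
    rw [hc]
    have hfun : ∀ k ∈ List.range (xs.length - 1),
        xs[(-2 + (xs.length:Int) + -(k:Int)).toNat]?
          = ((fun j => xs[j]?) ∘ (fun k => xs.length - 1 - 1 - k)) k := by
      intro k hk
      simp only [List.mem_range] at hk
      simp only [Function.comp]
      congr 1
      omega
    rw [List.filterMap_congr hfun, ← List.filterMap_map]
    have hrev : (List.range (xs.length - 1)).map (fun k => xs.length - 1 - 1 - k)
        = (List.range (xs.length - 1)).reverse := by
      rw [List.range_eq_range', List.reverse_range']
      simp [List.range_eq_range']
    rw [hrev, List.filterMap_reverse, filterMap_getElem_range _ _ (by omega),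
        ← List.dropLast_eq_take]
  · rw [if_neg h]
    rcases xs with _ | ⟨a, t⟩
    · simp
    · rcases t with _ | ⟨b, u⟩
      · simp
      · simp at h

-- str(j % 10) is a single character
theorem toChars_mod_ten_len (j : Int) : (pvF j).length = 1 := by
  have h0 : 0 ≤ PySem.Int.mod j 10 := PySem.Int.mod_nonneg j (by norm_num)
  have h1 : PySem.Int.mod j 10 < 10 := PySem.Int.mod_lt j (by norm_num)
  unfold pvF
  set m := PySem.Int.mod j 10 with hm
  clear_value m
  interval_cases m <;> decide

-- dropping the trailing newline of concatenated newline-terminated lines is joining them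
theorem dropLast_flatten_newline (rows : List (List Char)) :
    ((rows.map (· ++ ['\n'])).flatten).dropLast = PySem.Chars.join ['\n'] rows := by
  induction rows with
  | nil => simp [PySem.Chars.join_nil]
  | cons r t ih =>
    cases t with
    | nil => simp [PySem.Chars.join_singleton]
    | cons s u =>
      rw [List.map_cons, List.flatten_cons, PySem.Chars.join_cons_cons,
        List.dropLast_append_of_ne_nil, ih]
      all_goals simp

-- a prefix slice of the full digit table is the digit run of the shorter row
theorem take_digits (n i : Int) (h1 : 0 < i) (h2 : i ≤ n) :
    PySem.List.slice ((PySem.List.pyRange 1 (n + 1) 1).flatMap pvF) none (some i)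
      = (PySem.List.pyRange 1 (i + 1) 1).flatMap pvF := by
  rw [PySem.List.slice_to _ (le_of_lt h1)]
  rw [PySem.List.pyRange_one_append 1 (i + 1) (n + 1) (by omega) (by omega), List.flatMap_append]
  have hlen : ((PySem.List.pyRange 1 (i + 1) 1).flatMap pvF).length = i.toNat := by
    rw [List.length_flatMap]
    rw [List.map_congr_left (fun j _ => toChars_mod_ten_len j)]
    simp [PySem.List.length_pyRange_one]
  rw [← hlen, List.take_left]

-- port A computes the newline-terminated rows and drops the last character
theorem portA_eq (n : Int) :
    get_a_down_arrow_of n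
      = String.ofList ((((PySem.List.pyRange n 0 (-1)).map (fun i => pvRow n i ++ ['\n'])).flatten).dropLast) := by
  unfold get_a_down_arrow_of pvRow pvF
  simp only [PySem.List.foldl_append_eq_flatMap, List.nil_append, List.append_assoc,
    slice_neg2_none_neg_one_eq, Option.getD_some, PySem.List.slice_to_neg_one,
    List.flatMap_def]

-- port B computes the same rows
theorem portB_eq (n : Int) :
    get_a_down_arrow_of_alt n
      = String.ofList (PySem.Chars.join ['\n'] ((PySem.List.pyRange n 0 (-1)).map (fun i => pvRow n i))) := by
  simp only [get_a_down_arrow_of_alt]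
  congr 1
  congr 1
  refine List.map_congr_left (fun i hi => ?_)
  rw [PySem.List.mem_pyRange_neg_one] at hi
  rw [show ((PySem.List.pyRange 1 (n + 1) 1).map
      (fun j => (PySem.Int.toStr (PySem.Int.mod j 10)).toList)).flatten
      = (PySem.List.pyRange 1 (n + 1) 1).flatMap pvF from List.flatMap_def.symm]
  rw [take_digits n i hi.1 hi.2, PySem.List.slice_to_neg_one]
  unfold pvRow
  simp [List.append_assoc]

-- ===== VERDICT (by name: the statement is the Claim_ definition above) =====
theorem get_a_down_arrow_of_spec : Claim_equal_get_a_down_arrow_of := by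
  intro n _
  unfold Spec_get_a_down_arrow_of
  rw [portA_eq, portB_eq]
  rw [show (PySem.List.pyRange n 0 (-1)).map (fun i => pvRow n i ++ ['\n'])
      = ((PySem.List.pyRange n 0 (-1)).map (fun i => pvRow n i)).map (· ++ ['\n']) from by
    rw [List.map_map]; rfl]
  rw [dropLast_flatten_newline]
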